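-- pv_equiv track=rewrite | github.com/logeshwaran116/TSO_BS_server | dist/ba_root/mods/spazmod/tag.py | _replace_codes
-- ===== SOURCE A (Python) =====
-- def _replace_codes(tag: str) -> str:
--     repl = {
--         '\\d': '\ue048', '\\c': '\ue043', '\\h': '\ue049',
--         '\\s': '\ue046', '\\n': '\ue04b', '\\f': '\ue04f',
--         '\\g': '\ue027', '\\i': '\ue03a', '\\m': '\ue04d',
--         '\\t': '\ue01f', '\\bs': '\ue01e', '\\j': '\ue010',
--         '\\e': '\ue045', '\\l': '\ue047', '\\a': '\ue020',
--         '\\b': '\ue00c'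
--     }
--     for k, v in repl.items():
--         tag = tag.replace(k, v)
--     return tag
-- ===== SOURCE B (Python) =====
-- def _replace_codes(tag: str) -> str:
--     # single left-to-right scan; keyed by the letter after the backslash,
--     # trying the two-char code 'bs' before the one-char code 'b'
--     repl = {
--         'd': '\ue048', 'c': '\ue043', 'h': '\ue049',
--         's': '\ue046', 'n': '\ue04b', 'f': '\ue04f',
--         'g': '\ue027', 'i': '\ue03a', 'm': '\ue04d',
--         't': '\ue01f', 'j': '\ue010',
--         'e': '\ue045', 'l': '\ue047', 'a': '\ue020',
--         'b': '\ue00c'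
--     }
--     out = []
--     i = 0
--     n = len(tag)
--     while i < n:
--         c = tag[i]
--         if c == '\\' and i + 1 < n:
--             d = tag[i + 1]
--             if d == 'b' and i + 2 < n and tag[i + 2] == 's':
--                 out.append('\ue01e')
--                 i += 3
--                 continue
--             if d in repl:
--                 out.append(repl[d])
--                 i += 2
--                 continue
--         out.append(c)
--         i += 1
--     return ''.join(out)
-- ===== Notes on version B (the rewrite author's own statement) =====
-- stated objective: alternative
-- what changed: Replaced the 16 sequential full-string .replace passes with one left-to-right index scan that looks the letter after a backslash up in a dict (trying the two-char 'bs' code before 'b') and joins the pieces once; it trades A's 16 C-level passes for a single Python-level pass, so it is not faster in CPython.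
import Mathlib
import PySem

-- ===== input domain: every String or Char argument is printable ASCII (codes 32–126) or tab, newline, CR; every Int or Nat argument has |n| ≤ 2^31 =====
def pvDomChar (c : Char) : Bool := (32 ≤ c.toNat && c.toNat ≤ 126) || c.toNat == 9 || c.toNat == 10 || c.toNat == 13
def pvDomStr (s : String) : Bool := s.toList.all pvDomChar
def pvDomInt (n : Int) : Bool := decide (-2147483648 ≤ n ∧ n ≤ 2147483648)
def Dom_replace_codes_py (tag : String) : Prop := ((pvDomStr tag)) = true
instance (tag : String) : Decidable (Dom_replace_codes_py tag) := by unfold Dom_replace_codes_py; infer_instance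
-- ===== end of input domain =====

-- B replaces A's 16 sequential full-string .replace passes by one left-to-right scan keyed on the
-- letter after each backslash (trying the two-char 'bs' code before 'b'); objective: alternative (a single pass).

-- ===== PORT A =====
-- literal transliteration of A: the dict literal (insertion order) and one str.replace per item
def replace_codes_py (tag : String) : String :=
  let repl : List (String × String) :=
    [("\\d", "\uE048"), ("\\c", "\uE043"), ("\\h", "\uE049"),
     ("\\s", "\uE046"), ("\\n", "\uE04B"), ("\\f", "\uE04F"),
     ("\\g", "\uE027"), ("\\i", "\uE03A"), ("\\m", "\uE04D"),
     ("\\t", "\uE01F"), ("\\bs", "\uE01E"), ("\\j", "\uE010"),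
     ("\\e", "\uE045"), ("\\l", "\uE047"), ("\\a", "\uE020"),
     ("\\b", "\uE00C")]
  repl.foldl (fun t kv => PySem.Str.replace t kv.1 kv.2) tag

-- ===== PORT B =====
-- B's replacement dict keyed by the letter after the backslash (Source B's `repl`)
def pvCode1 (d : Char) : Option Char :=
  if d = 'd' then some '\uE048'
  else if d = 'c' then some '\uE043'
  else if d = 'h' then some '\uE049'
  else if d = 's' then some '\uE046'
  else if d = 'n' then some '\uE04B'
  else if d = 'f' then some '\uE04F'
  else if d = 'g' then some '\uE027'
  else if d = 'i' then some '\uE03A'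
  else if d = 'm' then some '\uE04D'
  else if d = 't' then some '\uE01F'
  else if d = 'j' then some '\uE010'
  else if d = 'e' then some '\uE045'
  else if d = 'l' then some '\uE047'
  else if d = 'a' then some '\uE020'
  else if d = 'b' then some '\uE00C'
  else none

-- B's single left-to-right scan (Source B's while loop; the output list is built front-to-back)
def pvScan : List Char → List Char
  | [] => []
  | '\\' :: 'b' :: 's' :: r => '\uE01E' :: pvScan r
  | '\\' :: d :: r =>
    match pvCode1 d with
    | some v => v :: pvScan r
    | none => '\\' :: pvScan (d :: r)
  | c :: rest => c :: pvScan rest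

def replace_codes_py_alt (tag : String) : String := String.ofList (pvScan tag.toList)

-- ===== PRECONDITION & SPEC =====
def Spec_replace_codes_py (tag : String) (out : String) : Prop := out = replace_codes_py_alt tag
instance (tag : String) (out : String) : Decidable (Spec_replace_codes_py tag out) := by unfold Spec_replace_codes_py; infer_instance

-- ===== CLAIM (what is proved, stated in full; the proofs are below) =====
def Claim_equal_replace_codes_py : Prop := ∀ (tag : String), Dom_replace_codes_py tag → Spec_replace_codes_py tag (replace_codes_py tag)

-- ===== LEMMAS AND PROOFS =====

-- facts about PySem.Chars.replace (no characterisation lemmas for it are in the prelude)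
theorem go_acc (old new : List Char) : ∀ (fuel : Nat) (l acc : List Char),
    PySem.Chars.replace.go old new fuel l acc = acc.reverse ++ PySem.Chars.replace.go old new fuel l [] := by
  intro fuel
  induction fuel with
  | zero => intro l acc; simp [PySem.Chars.replace.go]
  | succ n ih =>
    intro l acc
    cases l with
    | nil => simp [PySem.Chars.replace.go]
    | cons c t =>
      rw [PySem.Chars.replace.go, PySem.Chars.replace.go]
      split
      · rw [ih _ (new.reverse ++ acc), ih _ (new.reverse ++ [])]; simp
      · rw [ih _ (c :: acc), ih _ (c :: [])]; simp

theorem go_fuel (old new : List Char) (hold : old ≠ []) :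
    ∀ (k : Nat) (l : List Char) (f1 f2 : Nat), l.length = k → l.length ≤ f1 → l.length ≤ f2 →
    PySem.Chars.replace.go old new f1 l [] = PySem.Chars.replace.go old new f2 l [] := by
  intro k
  induction k using Nat.strong_induction_on with
  | _ k ih =>
    intro l f1 f2 hk h1 h2
    cases l with
    | nil =>
      cases f1 <;> cases f2 <;> simp [PySem.Chars.replace.go]
    | cons c t =>
      cases f1 with
      | zero => simp at h1
      | succ m1 =>
        cases f2 with
        | zero => simp at h2
        | succ m2 =>
          rw [PySem.Chars.replace.go, PySem.Chars.replace.go]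
          have hol : old.length ≥ 1 := by cases old with | nil => exact absurd rfl hold | cons a b => simp
          split
          · rename_i hpre
            have hle : old.length ≤ (c :: t).length := by
              rw [List.isPrefixOf_iff_prefix] at hpre; exact hpre.length_le
            rw [go_acc _ _ m1, go_acc _ _ m2]
            have hdlen : (List.drop old.length (c :: t)).length = (c::t).length - old.length := by simp
            have hlt : (List.drop old.length (c :: t)).length < k := by
              simp at hdlen hk ⊢; omega
            rw [ih _ hlt _ m1 (List.drop old.length (c :: t)).length rfl
                  (by simp at h1 ⊢; omega) (le_refl _),
                ih _ hlt _ m2 (List.drop old.length (c :: t)).length rfl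
                  (by simp at h2 ⊢; omega) (le_refl _)]
          · rw [go_acc _ _ m1 t, go_acc _ _ m2 t]
            have hlt : t.length < k := by simp at hk; omega
            rw [ih _ hlt _ m1 t.length rfl (by simp at h1; omega) (le_refl _),
                ih _ hlt _ m2 t.length rfl (by simp at h2; omega) (le_refl _)]

theorem replace_nil (old new : List Char) (hold : old ≠ []) : PySem.Chars.replace [] old new = [] := by
  rw [PySem.Chars.replace, if_neg (by simp [hold])]
  simp [PySem.Chars.replace.go]

theorem replace_cons_not_pre (old new : List Char) (c : Char) (x : List Char) (hold : old ≠ [])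
    (h : ¬ old <+: (c :: x)) : PySem.Chars.replace (c :: x) old new = c :: PySem.Chars.replace x old new := by
  have hP : old.isPrefixOf (c :: x) = false := by
    rw [← Bool.not_eq_true, List.isPrefixOf_iff_prefix]; exact h
  rw [PySem.Chars.replace, if_neg (by simp [hold]), PySem.Chars.replace, if_neg (by simp [hold])]
  rw [show (c :: x).length = x.length + 1 from by simp, PySem.Chars.replace.go, hP]
  simp only [Bool.false_eq_true, if_false]
  rw [go_acc]
  simp

theorem replace_pre (old new : List Char) (x : List Char) (hold : old ≠ []) :
    PySem.Chars.replace (old ++ x) old new = new ++ PySem.Chars.replace x old new := by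
  have h1 : old.length ≥ 1 := by cases old with | nil => exact absurd rfl hold | cons a b => simp
  rw [PySem.Chars.replace, if_neg (by simp [hold]), PySem.Chars.replace, if_neg (by simp [hold])]
  have hlen : (old ++ x).length = old.length + x.length := by simp
  obtain ⟨a, t, ht⟩ : ∃ a t, old ++ x = a :: t := by
    cases hh : old ++ x with
    | nil => exact absurd (List.append_eq_nil_iff.mp hh).1 hold
    | cons a t => exact ⟨a, t, rfl⟩
  rw [hlen, show old.length + x.length = (old.length + x.length - 1) + 1 from by omega,
     ht, PySem.Chars.replace.go]
  have hpre : old.isPrefixOf (a :: t) = true := by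
    rw [List.isPrefixOf_iff_prefix, ← ht]; exact List.prefix_append old x
  rw [hpre]
  simp only [if_true]
  have hdrop : List.drop old.length (a :: t) = x := by rw [← ht]; simp
  rw [hdrop, go_acc old new (old.length + x.length - 1) x (new.reverse ++ [])]
  simp only [List.append_nil]
  simp only [List.reverse_reverse]
  rw [go_fuel old new hold x.length x (old.length + x.length - 1) x.length rfl (by omega) (le_refl _)]

-- A's sixteen passes, on the Char-list side
def pvPass (x v : Char) (l : List Char) : List Char := PySem.Chars.replace l ['\\', x] [v]
def pvPassBS (l : List Char) : List Char := PySem.Chars.replace l ['\\', 'b', 's'] ['\uE01E']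
def pvA (l : List Char) : List Char :=
  pvPass 'b' '\uE00C' (pvPass 'a' '\uE020' (pvPass 'l' '\uE047' (pvPass 'e' '\uE045' (pvPass 'j' '\uE010' (pvPassBS (pvPass 't' '\uE01F' (pvPass 'm' '\uE04D' (pvPass 'i' '\uE03A' (pvPass 'g' '\uE027' (pvPass 'f' '\uE04F' (pvPass 'n' '\uE04B' (pvPass 's' '\uE046' (pvPass 'h' '\uE049' (pvPass 'c' '\uE043' (pvPass 'd' '\uE048' (l))))))))))))))))

theorem pvPass_cons (x v c : Char) (l : List Char) (h : c ≠ '\\') :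
    pvPass x v (c :: l) = c :: pvPass x v l := by
  refine replace_cons_not_pre _ _ _ _ (by simp) ?_
  intro hp
  exact h (List.cons_prefix_cons.mp hp).1.symm

theorem pvPassBS_cons (c : Char) (l : List Char) (h : c ≠ '\\') :
    pvPassBS (c :: l) = c :: pvPassBS l := by
  refine replace_cons_not_pre _ _ _ _ (by simp) ?_
  intro hp
  exact h (List.cons_prefix_cons.mp hp).1.symm

theorem pvPass_skip2 (x v d : Char) (l : List Char) (h1 : d ≠ x) (h2 : d ≠ '\\') :
    pvPass x v ('\\' :: d :: l) = '\\' :: d :: pvPass x v l := by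
  rw [show pvPass x v ('\\' :: d :: l) = '\\' :: pvPass x v (d :: l) from
        replace_cons_not_pre _ _ _ _ (by simp)
          (fun hp => h1 (List.cons_prefix_cons.mp (List.cons_prefix_cons.mp hp).2).1.symm)]
  rw [pvPass_cons _ _ _ _ h2]

theorem pvPass_match (x v : Char) (l : List Char) :
    pvPass x v ('\\' :: x :: l) = v :: pvPass x v l := by
  have h := replace_pre ['\\', x] [v] l (by simp)
  simpa [pvPass] using h

theorem pvPassBS_match (l : List Char) :
    pvPassBS ('\\' :: 'b' :: 's' :: l) = '\uE01E' :: pvPassBS l := by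
  have h := replace_pre ['\\', 'b', 's'] ['\uE01E'] l (by simp)
  simpa [pvPassBS] using h

theorem pvPass_peel1 (x v : Char) (l : List Char) (h : l.head? ≠ some x) :
    pvPass x v ('\\' :: l) = '\\' :: pvPass x v l := by
  refine replace_cons_not_pre _ _ _ _ (by simp) ?_
  intro hp
  have h2 := (List.cons_prefix_cons.mp hp).2
  cases l with
  | nil => simp at h2
  | cons a t => exact h (by rw [(List.cons_prefix_cons.mp h2).1]; rfl)

theorem pvPassBS_peel1 (l : List Char) (h : l.head? ≠ some 'b') :
    pvPassBS ('\\' :: l) = '\\' :: pvPassBS l := by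
  refine replace_cons_not_pre _ _ _ _ (by simp) ?_
  intro hp
  have h2 := (List.cons_prefix_cons.mp hp).2
  cases l with
  | nil => simp at h2
  | cons a t => exact h (by rw [(List.cons_prefix_cons.mp h2).1]; rfl)

theorem pvPassBS_skipb (l : List Char) (h : l.head? ≠ some 's') :
    pvPassBS ('\\' :: 'b' :: l) = '\\' :: 'b' :: pvPassBS l := by
  rw [show pvPassBS ('\\' :: 'b' :: l) = '\\' :: pvPassBS ('b' :: l) from
        replace_cons_not_pre _ _ _ _ (by simp) ?_]
  · rw [pvPassBS_cons _ _ (by decide)]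
  · intro hp
    have h2 := (List.cons_prefix_cons.mp (List.cons_prefix_cons.mp hp).2).2
    cases l with
    | nil => simp at h2
    | cons a t => exact h (by rw [(List.cons_prefix_cons.mp h2).1]; rfl)

theorem pvPass_head (x v : Char) (l : List Char) :
    (pvPass x v l).head? = l.head? ∨ (pvPass x v l).head? = some v := by
  cases l with
  | nil => left; rw [show pvPass x v [] = [] from replace_nil _ _ (by simp)]
  | cons c t =>
    by_cases hp : ['\\', x] <+: (c :: t)
    · obtain ⟨y, hy⟩ := hp
      right
      rw [← hy]
      rw [show (['\\', x] ++ y : List Char) = '\\' :: x :: y from rfl, pvPass_match]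
      rfl
    · left
      rw [show pvPass x v (c :: t) = c :: pvPass x v t from replace_cons_not_pre _ _ _ _ (by simp) hp]
      rfl

theorem pvPassBS_head (l : List Char) :
    (pvPassBS l).head? = l.head? ∨ (pvPassBS l).head? = some '\uE01E' := by
  cases l with
  | nil => left; rw [show pvPassBS [] = [] from replace_nil _ _ (by simp)]
  | cons c t =>
    by_cases hp : ['\\', 'b', 's'] <+: (c :: t)
    · obtain ⟨y, hy⟩ := hp
      right
      rw [← hy, show (['\\', 'b', 's'] ++ y : List Char) = '\\' :: 'b' :: 's' :: y from rfl, pvPassBS_match]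
      rfl
    · left
      rw [show pvPassBS (c :: t) = c :: pvPassBS t from replace_cons_not_pre _ _ _ _ (by simp) hp]
      rfl

theorem pvPass_head_ne (x v s : Char) (hv : v ≠ s) (l : List Char) (h : l.head? ≠ some s) :
    (pvPass x v l).head? ≠ some s := by
  rcases pvPass_head x v l with h1 | h1 <;> rw [h1]
  · exact h
  · simp [hv]

-- invariant for the no-code case: the head of the running string is never a code letter
def pvHeadOK (l : List Char) : Prop := ∀ c, l.head? = some c → pvCode1 c = none

theorem pvHeadOK_pass (x v : Char) (hv : pvCode1 v = none) (l : List Char) (h : pvHeadOK l) :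
    pvHeadOK (pvPass x v l) := by
  intro c hc
  rcases pvPass_head x v l with h1 | h1 <;> rw [h1] at hc
  · exact h c hc
  · cases hc; exact hv

theorem pvHeadOK_passBS (l : List Char) (h : pvHeadOK l) : pvHeadOK (pvPassBS l) := by
  intro c hc
  rcases pvPassBS_head l with h1 | h1 <;> rw [h1] at hc
  · exact h c hc
  · cases hc; decide

theorem pvHeadOK_ne (x : Char) (hx : pvCode1 x ≠ none) (l : List Char) (h : pvHeadOK l) :
    l.head? ≠ some x := fun hc => hx (h x hc)

theorem pvA_cons (c : Char) (l : List Char) (hc : c ≠ '\\') : pvA (c :: l) = c :: pvA l := by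
  simp only [pvA]
  rw [pvPass_cons 'd' '\uE048' c _ hc]
  rw [pvPass_cons 'c' '\uE043' c _ hc]
  rw [pvPass_cons 'h' '\uE049' c _ hc]
  rw [pvPass_cons 's' '\uE046' c _ hc]
  rw [pvPass_cons 'n' '\uE04B' c _ hc]
  rw [pvPass_cons 'f' '\uE04F' c _ hc]
  rw [pvPass_cons 'g' '\uE027' c _ hc]
  rw [pvPass_cons 'i' '\uE03A' c _ hc]
  rw [pvPass_cons 'm' '\uE04D' c _ hc]
  rw [pvPass_cons 't' '\uE01F' c _ hc]
  rw [pvPassBS_cons c _ hc]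
  rw [pvPass_cons 'j' '\uE010' c _ hc]
  rw [pvPass_cons 'e' '\uE045' c _ hc]
  rw [pvPass_cons 'l' '\uE047' c _ hc]
  rw [pvPass_cons 'a' '\uE020' c _ hc]
  rw [pvPass_cons 'b' '\uE00C' c _ hc]

theorem pvA_bs (r : List Char) : pvA ('\\' :: 'b' :: 's' :: r) = '\uE01E' :: pvA r := by
  simp only [pvA]
  rw [pvPass_skip2 'd' '\uE048' 'b' _ (by decide) (by decide)]
  rw [pvPass_cons 'd' '\uE048' 's' _ (by decide)]
  rw [pvPass_skip2 'c' '\uE043' 'b' _ (by decide) (by decide)]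
  rw [pvPass_cons 'c' '\uE043' 's' _ (by decide)]
  rw [pvPass_skip2 'h' '\uE049' 'b' _ (by decide) (by decide)]
  rw [pvPass_cons 'h' '\uE049' 's' _ (by decide)]
  rw [pvPass_skip2 's' '\uE046' 'b' _ (by decide) (by decide)]
  rw [pvPass_cons 's' '\uE046' 's' _ (by decide)]
  rw [pvPass_skip2 'n' '\uE04B' 'b' _ (by decide) (by decide)]
  rw [pvPass_cons 'n' '\uE04B' 's' _ (by decide)]
  rw [pvPass_skip2 'f' '\uE04F' 'b' _ (by decide) (by decide)]
  rw [pvPass_cons 'f' '\uE04F' 's' _ (by decide)]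
  rw [pvPass_skip2 'g' '\uE027' 'b' _ (by decide) (by decide)]
  rw [pvPass_cons 'g' '\uE027' 's' _ (by decide)]
  rw [pvPass_skip2 'i' '\uE03A' 'b' _ (by decide) (by decide)]
  rw [pvPass_cons 'i' '\uE03A' 's' _ (by decide)]
  rw [pvPass_skip2 'm' '\uE04D' 'b' _ (by decide) (by decide)]
  rw [pvPass_cons 'm' '\uE04D' 's' _ (by decide)]
  rw [pvPass_skip2 't' '\uE01F' 'b' _ (by decide) (by decide)]
  rw [pvPass_cons 't' '\uE01F' 's' _ (by decide)]
  rw [pvPassBS_match]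
  rw [pvPass_cons 'j' '\uE010' '\uE01E' _ (by decide)]
  rw [pvPass_cons 'e' '\uE045' '\uE01E' _ (by decide)]
  rw [pvPass_cons 'l' '\uE047' '\uE01E' _ (by decide)]
  rw [pvPass_cons 'a' '\uE020' '\uE01E' _ (by decide)]
  rw [pvPass_cons 'b' '\uE00C' '\uE01E' _ (by decide)]

theorem pvA_d (r : List Char) : pvA ('\\' :: 'd' :: r) = '\uE048' :: pvA r := by
  simp only [pvA]
  rw [pvPass_match 'd' '\uE048' _]
  rw [pvPass_cons 'c' '\uE043' '\uE048' _ (by decide)]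
  rw [pvPass_cons 'h' '\uE049' '\uE048' _ (by decide)]
  rw [pvPass_cons 's' '\uE046' '\uE048' _ (by decide)]
  rw [pvPass_cons 'n' '\uE04B' '\uE048' _ (by decide)]
  rw [pvPass_cons 'f' '\uE04F' '\uE048' _ (by decide)]
  rw [pvPass_cons 'g' '\uE027' '\uE048' _ (by decide)]
  rw [pvPass_cons 'i' '\uE03A' '\uE048' _ (by decide)]
  rw [pvPass_cons 'm' '\uE04D' '\uE048' _ (by decide)]
  rw [pvPass_cons 't' '\uE01F' '\uE048' _ (by decide)]
  rw [pvPassBS_cons '\uE048' _ (by decide)]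
  rw [pvPass_cons 'j' '\uE010' '\uE048' _ (by decide)]
  rw [pvPass_cons 'e' '\uE045' '\uE048' _ (by decide)]
  rw [pvPass_cons 'l' '\uE047' '\uE048' _ (by decide)]
  rw [pvPass_cons 'a' '\uE020' '\uE048' _ (by decide)]
  rw [pvPass_cons 'b' '\uE00C' '\uE048' _ (by decide)]

theorem pvA_c (r : List Char) : pvA ('\\' :: 'c' :: r) = '\uE043' :: pvA r := by
  simp only [pvA]
  rw [pvPass_skip2 'd' '\uE048' 'c' _ (by decide) (by decide)]
  rw [pvPass_match 'c' '\uE043' _]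
  rw [pvPass_cons 'h' '\uE049' '\uE043' _ (by decide)]
  rw [pvPass_cons 's' '\uE046' '\uE043' _ (by decide)]
  rw [pvPass_cons 'n' '\uE04B' '\uE043' _ (by decide)]
  rw [pvPass_cons 'f' '\uE04F' '\uE043' _ (by decide)]
  rw [pvPass_cons 'g' '\uE027' '\uE043' _ (by decide)]
  rw [pvPass_cons 'i' '\uE03A' '\uE043' _ (by decide)]
  rw [pvPass_cons 'm' '\uE04D' '\uE043' _ (by decide)]
  rw [pvPass_cons 't' '\uE01F' '\uE043' _ (by decide)]
  rw [pvPassBS_cons '\uE043' _ (by decide)]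
  rw [pvPass_cons 'j' '\uE010' '\uE043' _ (by decide)]
  rw [pvPass_cons 'e' '\uE045' '\uE043' _ (by decide)]
  rw [pvPass_cons 'l' '\uE047' '\uE043' _ (by decide)]
  rw [pvPass_cons 'a' '\uE020' '\uE043' _ (by decide)]
  rw [pvPass_cons 'b' '\uE00C' '\uE043' _ (by decide)]

theorem pvA_h (r : List Char) : pvA ('\\' :: 'h' :: r) = '\uE049' :: pvA r := by
  simp only [pvA]
  rw [pvPass_skip2 'd' '\uE048' 'h' _ (by decide) (by decide)]
  rw [pvPass_skip2 'c' '\uE043' 'h' _ (by decide) (by decide)]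
  rw [pvPass_match 'h' '\uE049' _]
  rw [pvPass_cons 's' '\uE046' '\uE049' _ (by decide)]
  rw [pvPass_cons 'n' '\uE04B' '\uE049' _ (by decide)]
  rw [pvPass_cons 'f' '\uE04F' '\uE049' _ (by decide)]
  rw [pvPass_cons 'g' '\uE027' '\uE049' _ (by decide)]
  rw [pvPass_cons 'i' '\uE03A' '\uE049' _ (by decide)]
  rw [pvPass_cons 'm' '\uE04D' '\uE049' _ (by decide)]
  rw [pvPass_cons 't' '\uE01F' '\uE049' _ (by decide)]
  rw [pvPassBS_cons '\uE049' _ (by decide)]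
  rw [pvPass_cons 'j' '\uE010' '\uE049' _ (by decide)]
  rw [pvPass_cons 'e' '\uE045' '\uE049' _ (by decide)]
  rw [pvPass_cons 'l' '\uE047' '\uE049' _ (by decide)]
  rw [pvPass_cons 'a' '\uE020' '\uE049' _ (by decide)]
  rw [pvPass_cons 'b' '\uE00C' '\uE049' _ (by decide)]

theorem pvA_s (r : List Char) : pvA ('\\' :: 's' :: r) = '\uE046' :: pvA r := by
  simp only [pvA]
  rw [pvPass_skip2 'd' '\uE048' 's' _ (by decide) (by decide)]
  rw [pvPass_skip2 'c' '\uE043' 's' _ (by decide) (by decide)]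
  rw [pvPass_skip2 'h' '\uE049' 's' _ (by decide) (by decide)]
  rw [pvPass_match 's' '\uE046' _]
  rw [pvPass_cons 'n' '\uE04B' '\uE046' _ (by decide)]
  rw [pvPass_cons 'f' '\uE04F' '\uE046' _ (by decide)]
  rw [pvPass_cons 'g' '\uE027' '\uE046' _ (by decide)]
  rw [pvPass_cons 'i' '\uE03A' '\uE046' _ (by decide)]
  rw [pvPass_cons 'm' '\uE04D' '\uE046' _ (by decide)]
  rw [pvPass_cons 't' '\uE01F' '\uE046' _ (by decide)]
  rw [pvPassBS_cons '\uE046' _ (by decide)]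
  rw [pvPass_cons 'j' '\uE010' '\uE046' _ (by decide)]
  rw [pvPass_cons 'e' '\uE045' '\uE046' _ (by decide)]
  rw [pvPass_cons 'l' '\uE047' '\uE046' _ (by decide)]
  rw [pvPass_cons 'a' '\uE020' '\uE046' _ (by decide)]
  rw [pvPass_cons 'b' '\uE00C' '\uE046' _ (by decide)]

theorem pvA_n (r : List Char) : pvA ('\\' :: 'n' :: r) = '\uE04B' :: pvA r := by
  simp only [pvA]
  rw [pvPass_skip2 'd' '\uE048' 'n' _ (by decide) (by decide)]
  rw [pvPass_skip2 'c' '\uE043' 'n' _ (by decide) (by decide)]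
  rw [pvPass_skip2 'h' '\uE049' 'n' _ (by decide) (by decide)]
  rw [pvPass_skip2 's' '\uE046' 'n' _ (by decide) (by decide)]
  rw [pvPass_match 'n' '\uE04B' _]
  rw [pvPass_cons 'f' '\uE04F' '\uE04B' _ (by decide)]
  rw [pvPass_cons 'g' '\uE027' '\uE04B' _ (by decide)]
  rw [pvPass_cons 'i' '\uE03A' '\uE04B' _ (by decide)]
  rw [pvPass_cons 'm' '\uE04D' '\uE04B' _ (by decide)]
  rw [pvPass_cons 't' '\uE01F' '\uE04B' _ (by decide)]
  rw [pvPassBS_cons '\uE04B' _ (by decide)]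
  rw [pvPass_cons 'j' '\uE010' '\uE04B' _ (by decide)]
  rw [pvPass_cons 'e' '\uE045' '\uE04B' _ (by decide)]
  rw [pvPass_cons 'l' '\uE047' '\uE04B' _ (by decide)]
  rw [pvPass_cons 'a' '\uE020' '\uE04B' _ (by decide)]
  rw [pvPass_cons 'b' '\uE00C' '\uE04B' _ (by decide)]

theorem pvA_f (r : List Char) : pvA ('\\' :: 'f' :: r) = '\uE04F' :: pvA r := by
  simp only [pvA]
  rw [pvPass_skip2 'd' '\uE048' 'f' _ (by decide) (by decide)]
  rw [pvPass_skip2 'c' '\uE043' 'f' _ (by decide) (by decide)]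
  rw [pvPass_skip2 'h' '\uE049' 'f' _ (by decide) (by decide)]
  rw [pvPass_skip2 's' '\uE046' 'f' _ (by decide) (by decide)]
  rw [pvPass_skip2 'n' '\uE04B' 'f' _ (by decide) (by decide)]
  rw [pvPass_match 'f' '\uE04F' _]
  rw [pvPass_cons 'g' '\uE027' '\uE04F' _ (by decide)]
  rw [pvPass_cons 'i' '\uE03A' '\uE04F' _ (by decide)]
  rw [pvPass_cons 'm' '\uE04D' '\uE04F' _ (by decide)]
  rw [pvPass_cons 't' '\uE01F' '\uE04F' _ (by decide)]
  rw [pvPassBS_cons '\uE04F' _ (by decide)]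
  rw [pvPass_cons 'j' '\uE010' '\uE04F' _ (by decide)]
  rw [pvPass_cons 'e' '\uE045' '\uE04F' _ (by decide)]
  rw [pvPass_cons 'l' '\uE047' '\uE04F' _ (by decide)]
  rw [pvPass_cons 'a' '\uE020' '\uE04F' _ (by decide)]
  rw [pvPass_cons 'b' '\uE00C' '\uE04F' _ (by decide)]

theorem pvA_g (r : List Char) : pvA ('\\' :: 'g' :: r) = '\uE027' :: pvA r := by
  simp only [pvA]
  rw [pvPass_skip2 'd' '\uE048' 'g' _ (by decide) (by decide)]
  rw [pvPass_skip2 'c' '\uE043' 'g' _ (by decide) (by decide)]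
  rw [pvPass_skip2 'h' '\uE049' 'g' _ (by decide) (by decide)]
  rw [pvPass_skip2 's' '\uE046' 'g' _ (by decide) (by decide)]
  rw [pvPass_skip2 'n' '\uE04B' 'g' _ (by decide) (by decide)]
  rw [pvPass_skip2 'f' '\uE04F' 'g' _ (by decide) (by decide)]
  rw [pvPass_match 'g' '\uE027' _]
  rw [pvPass_cons 'i' '\uE03A' '\uE027' _ (by decide)]
  rw [pvPass_cons 'm' '\uE04D' '\uE027' _ (by decide)]
  rw [pvPass_cons 't' '\uE01F' '\uE027' _ (by decide)]
  rw [pvPassBS_cons '\uE027' _ (by decide)]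
  rw [pvPass_cons 'j' '\uE010' '\uE027' _ (by decide)]
  rw [pvPass_cons 'e' '\uE045' '\uE027' _ (by decide)]
  rw [pvPass_cons 'l' '\uE047' '\uE027' _ (by decide)]
  rw [pvPass_cons 'a' '\uE020' '\uE027' _ (by decide)]
  rw [pvPass_cons 'b' '\uE00C' '\uE027' _ (by decide)]

theorem pvA_i (r : List Char) : pvA ('\\' :: 'i' :: r) = '\uE03A' :: pvA r := by
  simp only [pvA]
  rw [pvPass_skip2 'd' '\uE048' 'i' _ (by decide) (by decide)]
  rw [pvPass_skip2 'c' '\uE043' 'i' _ (by decide) (by decide)]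
  rw [pvPass_skip2 'h' '\uE049' 'i' _ (by decide) (by decide)]
  rw [pvPass_skip2 's' '\uE046' 'i' _ (by decide) (by decide)]
  rw [pvPass_skip2 'n' '\uE04B' 'i' _ (by decide) (by decide)]
  rw [pvPass_skip2 'f' '\uE04F' 'i' _ (by decide) (by decide)]
  rw [pvPass_skip2 'g' '\uE027' 'i' _ (by decide) (by decide)]
  rw [pvPass_match 'i' '\uE03A' _]
  rw [pvPass_cons 'm' '\uE04D' '\uE03A' _ (by decide)]
  rw [pvPass_cons 't' '\uE01F' '\uE03A' _ (by decide)]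
  rw [pvPassBS_cons '\uE03A' _ (by decide)]
  rw [pvPass_cons 'j' '\uE010' '\uE03A' _ (by decide)]
  rw [pvPass_cons 'e' '\uE045' '\uE03A' _ (by decide)]
  rw [pvPass_cons 'l' '\uE047' '\uE03A' _ (by decide)]
  rw [pvPass_cons 'a' '\uE020' '\uE03A' _ (by decide)]
  rw [pvPass_cons 'b' '\uE00C' '\uE03A' _ (by decide)]

theorem pvA_m (r : List Char) : pvA ('\\' :: 'm' :: r) = '\uE04D' :: pvA r := by
  simp only [pvA]
  rw [pvPass_skip2 'd' '\uE048' 'm' _ (by decide) (by decide)]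
  rw [pvPass_skip2 'c' '\uE043' 'm' _ (by decide) (by decide)]
  rw [pvPass_skip2 'h' '\uE049' 'm' _ (by decide) (by decide)]
  rw [pvPass_skip2 's' '\uE046' 'm' _ (by decide) (by decide)]
  rw [pvPass_skip2 'n' '\uE04B' 'm' _ (by decide) (by decide)]
  rw [pvPass_skip2 'f' '\uE04F' 'm' _ (by decide) (by decide)]
  rw [pvPass_skip2 'g' '\uE027' 'm' _ (by decide) (by decide)]
  rw [pvPass_skip2 'i' '\uE03A' 'm' _ (by decide) (by decide)]
  rw [pvPass_match 'm' '\uE04D' _]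
  rw [pvPass_cons 't' '\uE01F' '\uE04D' _ (by decide)]
  rw [pvPassBS_cons '\uE04D' _ (by decide)]
  rw [pvPass_cons 'j' '\uE010' '\uE04D' _ (by decide)]
  rw [pvPass_cons 'e' '\uE045' '\uE04D' _ (by decide)]
  rw [pvPass_cons 'l' '\uE047' '\uE04D' _ (by decide)]
  rw [pvPass_cons 'a' '\uE020' '\uE04D' _ (by decide)]
  rw [pvPass_cons 'b' '\uE00C' '\uE04D' _ (by decide)]

theorem pvA_t (r : List Char) : pvA ('\\' :: 't' :: r) = '\uE01F' :: pvA r := by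
  simp only [pvA]
  rw [pvPass_skip2 'd' '\uE048' 't' _ (by decide) (by decide)]
  rw [pvPass_skip2 'c' '\uE043' 't' _ (by decide) (by decide)]
  rw [pvPass_skip2 'h' '\uE049' 't' _ (by decide) (by decide)]
  rw [pvPass_skip2 's' '\uE046' 't' _ (by decide) (by decide)]
  rw [pvPass_skip2 'n' '\uE04B' 't' _ (by decide) (by decide)]
  rw [pvPass_skip2 'f' '\uE04F' 't' _ (by decide) (by decide)]
  rw [pvPass_skip2 'g' '\uE027' 't' _ (by decide) (by decide)]
  rw [pvPass_skip2 'i' '\uE03A' 't' _ (by decide) (by decide)]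
  rw [pvPass_skip2 'm' '\uE04D' 't' _ (by decide) (by decide)]
  rw [pvPass_match 't' '\uE01F' _]
  rw [pvPassBS_cons '\uE01F' _ (by decide)]
  rw [pvPass_cons 'j' '\uE010' '\uE01F' _ (by decide)]
  rw [pvPass_cons 'e' '\uE045' '\uE01F' _ (by decide)]
  rw [pvPass_cons 'l' '\uE047' '\uE01F' _ (by decide)]
  rw [pvPass_cons 'a' '\uE020' '\uE01F' _ (by decide)]
  rw [pvPass_cons 'b' '\uE00C' '\uE01F' _ (by decide)]

theorem pvA_j (r : List Char) : pvA ('\\' :: 'j' :: r) = '\uE010' :: pvA r := by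
  simp only [pvA]
  rw [pvPass_skip2 'd' '\uE048' 'j' _ (by decide) (by decide)]
  rw [pvPass_skip2 'c' '\uE043' 'j' _ (by decide) (by decide)]
  rw [pvPass_skip2 'h' '\uE049' 'j' _ (by decide) (by decide)]
  rw [pvPass_skip2 's' '\uE046' 'j' _ (by decide) (by decide)]
  rw [pvPass_skip2 'n' '\uE04B' 'j' _ (by decide) (by decide)]
  rw [pvPass_skip2 'f' '\uE04F' 'j' _ (by decide) (by decide)]
  rw [pvPass_skip2 'g' '\uE027' 'j' _ (by decide) (by decide)]
  rw [pvPass_skip2 'i' '\uE03A' 'j' _ (by decide) (by decide)]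
  rw [pvPass_skip2 'm' '\uE04D' 'j' _ (by decide) (by decide)]
  rw [pvPass_skip2 't' '\uE01F' 'j' _ (by decide) (by decide)]
  rw [pvPassBS_peel1 _ (by simp)]
  rw [pvPassBS_cons 'j' _ (by decide)]
  rw [pvPass_match 'j' '\uE010' _]
  rw [pvPass_cons 'e' '\uE045' '\uE010' _ (by decide)]
  rw [pvPass_cons 'l' '\uE047' '\uE010' _ (by decide)]
  rw [pvPass_cons 'a' '\uE020' '\uE010' _ (by decide)]
  rw [pvPass_cons 'b' '\uE00C' '\uE010' _ (by decide)]

theorem pvA_e (r : List Char) : pvA ('\\' :: 'e' :: r) = '\uE045' :: pvA r := by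
  simp only [pvA]
  rw [pvPass_skip2 'd' '\uE048' 'e' _ (by decide) (by decide)]
  rw [pvPass_skip2 'c' '\uE043' 'e' _ (by decide) (by decide)]
  rw [pvPass_skip2 'h' '\uE049' 'e' _ (by decide) (by decide)]
  rw [pvPass_skip2 's' '\uE046' 'e' _ (by decide) (by decide)]
  rw [pvPass_skip2 'n' '\uE04B' 'e' _ (by decide) (by decide)]
  rw [pvPass_skip2 'f' '\uE04F' 'e' _ (by decide) (by decide)]
  rw [pvPass_skip2 'g' '\uE027' 'e' _ (by decide) (by decide)]
  rw [pvPass_skip2 'i' '\uE03A' 'e' _ (by decide) (by decide)]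
  rw [pvPass_skip2 'm' '\uE04D' 'e' _ (by decide) (by decide)]
  rw [pvPass_skip2 't' '\uE01F' 'e' _ (by decide) (by decide)]
  rw [pvPassBS_peel1 _ (by simp)]
  rw [pvPassBS_cons 'e' _ (by decide)]
  rw [pvPass_skip2 'j' '\uE010' 'e' _ (by decide) (by decide)]
  rw [pvPass_match 'e' '\uE045' _]
  rw [pvPass_cons 'l' '\uE047' '\uE045' _ (by decide)]
  rw [pvPass_cons 'a' '\uE020' '\uE045' _ (by decide)]
  rw [pvPass_cons 'b' '\uE00C' '\uE045' _ (by decide)]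

theorem pvA_l (r : List Char) : pvA ('\\' :: 'l' :: r) = '\uE047' :: pvA r := by
  simp only [pvA]
  rw [pvPass_skip2 'd' '\uE048' 'l' _ (by decide) (by decide)]
  rw [pvPass_skip2 'c' '\uE043' 'l' _ (by decide) (by decide)]
  rw [pvPass_skip2 'h' '\uE049' 'l' _ (by decide) (by decide)]
  rw [pvPass_skip2 's' '\uE046' 'l' _ (by decide) (by decide)]
  rw [pvPass_skip2 'n' '\uE04B' 'l' _ (by decide) (by decide)]
  rw [pvPass_skip2 'f' '\uE04F' 'l' _ (by decide) (by decide)]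
  rw [pvPass_skip2 'g' '\uE027' 'l' _ (by decide) (by decide)]
  rw [pvPass_skip2 'i' '\uE03A' 'l' _ (by decide) (by decide)]
  rw [pvPass_skip2 'm' '\uE04D' 'l' _ (by decide) (by decide)]
  rw [pvPass_skip2 't' '\uE01F' 'l' _ (by decide) (by decide)]
  rw [pvPassBS_peel1 _ (by simp)]
  rw [pvPassBS_cons 'l' _ (by decide)]
  rw [pvPass_skip2 'j' '\uE010' 'l' _ (by decide) (by decide)]
  rw [pvPass_skip2 'e' '\uE045' 'l' _ (by decide) (by decide)]
  rw [pvPass_match 'l' '\uE047' _]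
  rw [pvPass_cons 'a' '\uE020' '\uE047' _ (by decide)]
  rw [pvPass_cons 'b' '\uE00C' '\uE047' _ (by decide)]

theorem pvA_a (r : List Char) : pvA ('\\' :: 'a' :: r) = '\uE020' :: pvA r := by
  simp only [pvA]
  rw [pvPass_skip2 'd' '\uE048' 'a' _ (by decide) (by decide)]
  rw [pvPass_skip2 'c' '\uE043' 'a' _ (by decide) (by decide)]
  rw [pvPass_skip2 'h' '\uE049' 'a' _ (by decide) (by decide)]
  rw [pvPass_skip2 's' '\uE046' 'a' _ (by decide) (by decide)]
  rw [pvPass_skip2 'n' '\uE04B' 'a' _ (by decide) (by decide)]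
  rw [pvPass_skip2 'f' '\uE04F' 'a' _ (by decide) (by decide)]
  rw [pvPass_skip2 'g' '\uE027' 'a' _ (by decide) (by decide)]
  rw [pvPass_skip2 'i' '\uE03A' 'a' _ (by decide) (by decide)]
  rw [pvPass_skip2 'm' '\uE04D' 'a' _ (by decide) (by decide)]
  rw [pvPass_skip2 't' '\uE01F' 'a' _ (by decide) (by decide)]
  rw [pvPassBS_peel1 _ (by simp)]
  rw [pvPassBS_cons 'a' _ (by decide)]
  rw [pvPass_skip2 'j' '\uE010' 'a' _ (by decide) (by decide)]
  rw [pvPass_skip2 'e' '\uE045' 'a' _ (by decide) (by decide)]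
  rw [pvPass_skip2 'l' '\uE047' 'a' _ (by decide) (by decide)]
  rw [pvPass_match 'a' '\uE020' _]
  rw [pvPass_cons 'b' '\uE00C' '\uE020' _ (by decide)]

theorem pvA_b (r : List Char) (hr : r.head? ≠ some 's') : pvA ('\\' :: 'b' :: r) = '\uE00C' :: pvA r := by
  simp only [pvA]
  have h0 : r.head? ≠ some 's' := hr
  have h1 : (pvPass 'd' '\uE048' (r)).head? ≠ some 's' := pvPass_head_ne _ _ _ (by decide) _ h0
  have h2 : (pvPass 'c' '\uE043' (pvPass 'd' '\uE048' (r))).head? ≠ some 's' := pvPass_head_ne _ _ _ (by decide) _ h1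
  have h3 : (pvPass 'h' '\uE049' (pvPass 'c' '\uE043' (pvPass 'd' '\uE048' (r)))).head? ≠ some 's' := pvPass_head_ne _ _ _ (by decide) _ h2
  have h4 : (pvPass 's' '\uE046' (pvPass 'h' '\uE049' (pvPass 'c' '\uE043' (pvPass 'd' '\uE048' (r))))).head? ≠ some 's' := pvPass_head_ne _ _ _ (by decide) _ h3
  have h5 : (pvPass 'n' '\uE04B' (pvPass 's' '\uE046' (pvPass 'h' '\uE049' (pvPass 'c' '\uE043' (pvPass 'd' '\uE048' (r)))))).head? ≠ some 's' := pvPass_head_ne _ _ _ (by decide) _ h4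
  have h6 : (pvPass 'f' '\uE04F' (pvPass 'n' '\uE04B' (pvPass 's' '\uE046' (pvPass 'h' '\uE049' (pvPass 'c' '\uE043' (pvPass 'd' '\uE048' (r))))))).head? ≠ some 's' := pvPass_head_ne _ _ _ (by decide) _ h5
  have h7 : (pvPass 'g' '\uE027' (pvPass 'f' '\uE04F' (pvPass 'n' '\uE04B' (pvPass 's' '\uE046' (pvPass 'h' '\uE049' (pvPass 'c' '\uE043' (pvPass 'd' '\uE048' (r)))))))).head? ≠ some 's' := pvPass_head_ne _ _ _ (by decide) _ h6
  have h8 : (pvPass 'i' '\uE03A' (pvPass 'g' '\uE027' (pvPass 'f' '\uE04F' (pvPass 'n' '\uE04B' (pvPass 's' '\uE046' (pvPass 'h' '\uE049' (pvPass 'c' '\uE043' (pvPass 'd' '\uE048' (r))))))))).head? ≠ some 's' := pvPass_head_ne _ _ _ (by decide) _ h7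
  have h9 : (pvPass 'm' '\uE04D' (pvPass 'i' '\uE03A' (pvPass 'g' '\uE027' (pvPass 'f' '\uE04F' (pvPass 'n' '\uE04B' (pvPass 's' '\uE046' (pvPass 'h' '\uE049' (pvPass 'c' '\uE043' (pvPass 'd' '\uE048' (r)))))))))).head? ≠ some 's' := pvPass_head_ne _ _ _ (by decide) _ h8
  have h10 : (pvPass 't' '\uE01F' (pvPass 'm' '\uE04D' (pvPass 'i' '\uE03A' (pvPass 'g' '\uE027' (pvPass 'f' '\uE04F' (pvPass 'n' '\uE04B' (pvPass 's' '\uE046' (pvPass 'h' '\uE049' (pvPass 'c' '\uE043' (pvPass 'd' '\uE048' (r))))))))))).head? ≠ some 's' := pvPass_head_ne _ _ _ (by decide) _ h9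
  rw [pvPass_skip2 'd' '\uE048' 'b' _ (by decide) (by decide)]
  rw [pvPass_skip2 'c' '\uE043' 'b' _ (by decide) (by decide)]
  rw [pvPass_skip2 'h' '\uE049' 'b' _ (by decide) (by decide)]
  rw [pvPass_skip2 's' '\uE046' 'b' _ (by decide) (by decide)]
  rw [pvPass_skip2 'n' '\uE04B' 'b' _ (by decide) (by decide)]
  rw [pvPass_skip2 'f' '\uE04F' 'b' _ (by decide) (by decide)]
  rw [pvPass_skip2 'g' '\uE027' 'b' _ (by decide) (by decide)]
  rw [pvPass_skip2 'i' '\uE03A' 'b' _ (by decide) (by decide)]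
  rw [pvPass_skip2 'm' '\uE04D' 'b' _ (by decide) (by decide)]
  rw [pvPass_skip2 't' '\uE01F' 'b' _ (by decide) (by decide)]
  rw [pvPassBS_skipb _ h10]
  rw [pvPass_skip2 'j' '\uE010' 'b' _ (by decide) (by decide)]
  rw [pvPass_skip2 'e' '\uE045' 'b' _ (by decide) (by decide)]
  rw [pvPass_skip2 'l' '\uE047' 'b' _ (by decide) (by decide)]
  rw [pvPass_skip2 'a' '\uE020' 'b' _ (by decide) (by decide)]
  rw [pvPass_match 'b' '\uE00C' _]

theorem pvA_peel (d : Char) (r : List Char) (hd : pvCode1 d = none) :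
    pvA ('\\' :: d :: r) = '\\' :: pvA (d :: r) := by
  simp only [pvA]
  have h0 : pvHeadOK (d :: r) := by intro c hc; simp at hc; cases hc; exact hd
  rw [pvPass_peel1 'd' '\uE048' _ (pvHeadOK_ne 'd' (by decide) _ h0)]
  have h1 : pvHeadOK (pvPass 'd' '\uE048' (d :: r)) := pvHeadOK_pass 'd' '\uE048' (by decide) _ h0
  rw [pvPass_peel1 'c' '\uE043' _ (pvHeadOK_ne 'c' (by decide) _ h1)]
  have h2 : pvHeadOK (pvPass 'c' '\uE043' (pvPass 'd' '\uE048' (d :: r))) := pvHeadOK_pass 'c' '\uE043' (by decide) _ h1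
  rw [pvPass_peel1 'h' '\uE049' _ (pvHeadOK_ne 'h' (by decide) _ h2)]
  have h3 : pvHeadOK (pvPass 'h' '\uE049' (pvPass 'c' '\uE043' (pvPass 'd' '\uE048' (d :: r)))) := pvHeadOK_pass 'h' '\uE049' (by decide) _ h2
  rw [pvPass_peel1 's' '\uE046' _ (pvHeadOK_ne 's' (by decide) _ h3)]
  have h4 : pvHeadOK (pvPass 's' '\uE046' (pvPass 'h' '\uE049' (pvPass 'c' '\uE043' (pvPass 'd' '\uE048' (d :: r))))) := pvHeadOK_pass 's' '\uE046' (by decide) _ h3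
  rw [pvPass_peel1 'n' '\uE04B' _ (pvHeadOK_ne 'n' (by decide) _ h4)]
  have h5 : pvHeadOK (pvPass 'n' '\uE04B' (pvPass 's' '\uE046' (pvPass 'h' '\uE049' (pvPass 'c' '\uE043' (pvPass 'd' '\uE048' (d :: r)))))) := pvHeadOK_pass 'n' '\uE04B' (by decide) _ h4
  rw [pvPass_peel1 'f' '\uE04F' _ (pvHeadOK_ne 'f' (by decide) _ h5)]
  have h6 : pvHeadOK (pvPass 'f' '\uE04F' (pvPass 'n' '\uE04B' (pvPass 's' '\uE046' (pvPass 'h' '\uE049' (pvPass 'c' '\uE043' (pvPass 'd' '\uE048' (d :: r))))))) := pvHeadOK_pass 'f' '\uE04F' (by decide) _ h5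
  rw [pvPass_peel1 'g' '\uE027' _ (pvHeadOK_ne 'g' (by decide) _ h6)]
  have h7 : pvHeadOK (pvPass 'g' '\uE027' (pvPass 'f' '\uE04F' (pvPass 'n' '\uE04B' (pvPass 's' '\uE046' (pvPass 'h' '\uE049' (pvPass 'c' '\uE043' (pvPass 'd' '\uE048' (d :: r)))))))) := pvHeadOK_pass 'g' '\uE027' (by decide) _ h6
  rw [pvPass_peel1 'i' '\uE03A' _ (pvHeadOK_ne 'i' (by decide) _ h7)]
  have h8 : pvHeadOK (pvPass 'i' '\uE03A' (pvPass 'g' '\uE027' (pvPass 'f' '\uE04F' (pvPass 'n' '\uE04B' (pvPass 's' '\uE046' (pvPass 'h' '\uE049' (pvPass 'c' '\uE043' (pvPass 'd' '\uE048' (d :: r))))))))) := pvHeadOK_pass 'i' '\uE03A' (by decide) _ h7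
  rw [pvPass_peel1 'm' '\uE04D' _ (pvHeadOK_ne 'm' (by decide) _ h8)]
  have h9 : pvHeadOK (pvPass 'm' '\uE04D' (pvPass 'i' '\uE03A' (pvPass 'g' '\uE027' (pvPass 'f' '\uE04F' (pvPass 'n' '\uE04B' (pvPass 's' '\uE046' (pvPass 'h' '\uE049' (pvPass 'c' '\uE043' (pvPass 'd' '\uE048' (d :: r)))))))))) := pvHeadOK_pass 'm' '\uE04D' (by decide) _ h8
  rw [pvPass_peel1 't' '\uE01F' _ (pvHeadOK_ne 't' (by decide) _ h9)]
  have h10 : pvHeadOK (pvPass 't' '\uE01F' (pvPass 'm' '\uE04D' (pvPass 'i' '\uE03A' (pvPass 'g' '\uE027' (pvPass 'f' '\uE04F' (pvPass 'n' '\uE04B' (pvPass 's' '\uE046' (pvPass 'h' '\uE049' (pvPass 'c' '\uE043' (pvPass 'd' '\uE048' (d :: r))))))))))) := pvHeadOK_pass 't' '\uE01F' (by decide) _ h9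
  rw [pvPassBS_peel1 _ (pvHeadOK_ne 'b' (by decide) _ h10)]
  have h11 : pvHeadOK (pvPassBS (pvPass 't' '\uE01F' (pvPass 'm' '\uE04D' (pvPass 'i' '\uE03A' (pvPass 'g' '\uE027' (pvPass 'f' '\uE04F' (pvPass 'n' '\uE04B' (pvPass 's' '\uE046' (pvPass 'h' '\uE049' (pvPass 'c' '\uE043' (pvPass 'd' '\uE048' (d :: r)))))))))))) := pvHeadOK_passBS _ h10
  rw [pvPass_peel1 'j' '\uE010' _ (pvHeadOK_ne 'j' (by decide) _ h11)]
  have h12 : pvHeadOK (pvPass 'j' '\uE010' (pvPassBS (pvPass 't' '\uE01F' (pvPass 'm' '\uE04D' (pvPass 'i' '\uE03A' (pvPass 'g' '\uE027' (pvPass 'f' '\uE04F' (pvPass 'n' '\uE04B' (pvPass 's' '\uE046' (pvPass 'h' '\uE049' (pvPass 'c' '\uE043' (pvPass 'd' '\uE048' (d :: r))))))))))))) := pvHeadOK_pass 'j' '\uE010' (by decide) _ h11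
  rw [pvPass_peel1 'e' '\uE045' _ (pvHeadOK_ne 'e' (by decide) _ h12)]
  have h13 : pvHeadOK (pvPass 'e' '\uE045' (pvPass 'j' '\uE010' (pvPassBS (pvPass 't' '\uE01F' (pvPass 'm' '\uE04D' (pvPass 'i' '\uE03A' (pvPass 'g' '\uE027' (pvPass 'f' '\uE04F' (pvPass 'n' '\uE04B' (pvPass 's' '\uE046' (pvPass 'h' '\uE049' (pvPass 'c' '\uE043' (pvPass 'd' '\uE048' (d :: r)))))))))))))) := pvHeadOK_pass 'e' '\uE045' (by decide) _ h12
  rw [pvPass_peel1 'l' '\uE047' _ (pvHeadOK_ne 'l' (by decide) _ h13)]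
  have h14 : pvHeadOK (pvPass 'l' '\uE047' (pvPass 'e' '\uE045' (pvPass 'j' '\uE010' (pvPassBS (pvPass 't' '\uE01F' (pvPass 'm' '\uE04D' (pvPass 'i' '\uE03A' (pvPass 'g' '\uE027' (pvPass 'f' '\uE04F' (pvPass 'n' '\uE04B' (pvPass 's' '\uE046' (pvPass 'h' '\uE049' (pvPass 'c' '\uE043' (pvPass 'd' '\uE048' (d :: r))))))))))))))) := pvHeadOK_pass 'l' '\uE047' (by decide) _ h13
  rw [pvPass_peel1 'a' '\uE020' _ (pvHeadOK_ne 'a' (by decide) _ h14)]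
  have h15 : pvHeadOK (pvPass 'a' '\uE020' (pvPass 'l' '\uE047' (pvPass 'e' '\uE045' (pvPass 'j' '\uE010' (pvPassBS (pvPass 't' '\uE01F' (pvPass 'm' '\uE04D' (pvPass 'i' '\uE03A' (pvPass 'g' '\uE027' (pvPass 'f' '\uE04F' (pvPass 'n' '\uE04B' (pvPass 's' '\uE046' (pvPass 'h' '\uE049' (pvPass 'c' '\uE043' (pvPass 'd' '\uE048' (d :: r)))))))))))))))) := pvHeadOK_pass 'a' '\uE020' (by decide) _ h14
  rw [pvPass_peel1 'b' '\uE00C' _ (pvHeadOK_ne 'b' (by decide) _ h15)]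

theorem pvScan_cons_ne (c : Char) (rest : List Char) (hc : c ≠ '\\') :
    pvScan (c :: rest) = c :: pvScan rest := by
  rw [pvScan.eq_def]; split <;> simp_all

theorem pvScan_bs (r : List Char) :
    pvScan ('\\' :: 'b' :: 's' :: r) = '\uE01E' :: pvScan r := rfl

theorem pvScan_code (d v : Char) (r : List Char) (h : pvCode1 d = some v)
    (hbs : ¬ (d = 'b' ∧ r.head? = some 's')) :
    pvScan ('\\' :: d :: r) = v :: pvScan r := by
  rw [pvScan.eq_def]
  split
  · rename_i heq; exact absurd heq (by simp)
  · rename_i heq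
    injection heq with h1 h2
    injection h2 with h3 h4
    exact absurd ⟨h3, by rw [h4]; rfl⟩ hbs
  · rename_i heq
    injection heq with h1 h2
    injection h2 with h3 h4
    subst h3; subst h4
    rw [h]
  · rename_i hx heq
    injection heq with h1 h2
    exact absurd h2.symm (hx d r h1.symm)

theorem pvScan_none (d : Char) (r : List Char) (h : pvCode1 d = none) :
    pvScan ('\\' :: d :: r) = '\\' :: pvScan (d :: r) := by
  rw [pvScan.eq_def]
  split
  · rename_i heq; exact absurd heq (by simp)
  · rename_i heq
    injection heq with h1 h2
    injection h2 with h3 h4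
    rw [h3] at h
    exact absurd h (by rw [show pvCode1 'b' = some '\uE00C' from rfl]; simp)
  · rename_i heq
    injection heq with h1 h2
    injection h2 with h3 h4
    subst h3; subst h4
    rw [h]
  · rename_i hx heq
    injection heq with h1 h2
    exact absurd h2.symm (hx d r h1.symm)

theorem pvA_nil : pvA [] = [] := by
  simp [pvA, pvPass, pvPassBS, replace_nil]

theorem pvA_bsl : pvA ['\\'] = ['\\'] := by
  simp only [pvA]
  rw [show pvPass 'd' '\uE048' ['\\'] = '\\' :: pvPass 'd' '\uE048' [] from pvPass_peel1 _ _ _ (by simp),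
      show pvPass 'd' '\uE048' [] = [] from replace_nil _ _ (by simp)]
  rw [show pvPass 'c' '\uE043' ['\\'] = '\\' :: pvPass 'c' '\uE043' [] from pvPass_peel1 _ _ _ (by simp),
      show pvPass 'c' '\uE043' [] = [] from replace_nil _ _ (by simp)]
  rw [show pvPass 'h' '\uE049' ['\\'] = '\\' :: pvPass 'h' '\uE049' [] from pvPass_peel1 _ _ _ (by simp),
      show pvPass 'h' '\uE049' [] = [] from replace_nil _ _ (by simp)]
  rw [show pvPass 's' '\uE046' ['\\'] = '\\' :: pvPass 's' '\uE046' [] from pvPass_peel1 _ _ _ (by simp),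
      show pvPass 's' '\uE046' [] = [] from replace_nil _ _ (by simp)]
  rw [show pvPass 'n' '\uE04B' ['\\'] = '\\' :: pvPass 'n' '\uE04B' [] from pvPass_peel1 _ _ _ (by simp),
      show pvPass 'n' '\uE04B' [] = [] from replace_nil _ _ (by simp)]
  rw [show pvPass 'f' '\uE04F' ['\\'] = '\\' :: pvPass 'f' '\uE04F' [] from pvPass_peel1 _ _ _ (by simp),
      show pvPass 'f' '\uE04F' [] = [] from replace_nil _ _ (by simp)]
  rw [show pvPass 'g' '\uE027' ['\\'] = '\\' :: pvPass 'g' '\uE027' [] from pvPass_peel1 _ _ _ (by simp),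
      show pvPass 'g' '\uE027' [] = [] from replace_nil _ _ (by simp)]
  rw [show pvPass 'i' '\uE03A' ['\\'] = '\\' :: pvPass 'i' '\uE03A' [] from pvPass_peel1 _ _ _ (by simp),
      show pvPass 'i' '\uE03A' [] = [] from replace_nil _ _ (by simp)]
  rw [show pvPass 'm' '\uE04D' ['\\'] = '\\' :: pvPass 'm' '\uE04D' [] from pvPass_peel1 _ _ _ (by simp),
      show pvPass 'm' '\uE04D' [] = [] from replace_nil _ _ (by simp)]
  rw [show pvPass 't' '\uE01F' ['\\'] = '\\' :: pvPass 't' '\uE01F' [] from pvPass_peel1 _ _ _ (by simp),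
      show pvPass 't' '\uE01F' [] = [] from replace_nil _ _ (by simp)]
  rw [show pvPassBS ['\\'] = '\\' :: pvPassBS [] from pvPassBS_peel1 _ (by simp),
      show pvPassBS [] = [] from replace_nil _ _ (by simp)]
  rw [show pvPass 'j' '\uE010' ['\\'] = '\\' :: pvPass 'j' '\uE010' [] from pvPass_peel1 _ _ _ (by simp),
      show pvPass 'j' '\uE010' [] = [] from replace_nil _ _ (by simp)]
  rw [show pvPass 'e' '\uE045' ['\\'] = '\\' :: pvPass 'e' '\uE045' [] from pvPass_peel1 _ _ _ (by simp),
      show pvPass 'e' '\uE045' [] = [] from replace_nil _ _ (by simp)]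
  rw [show pvPass 'l' '\uE047' ['\\'] = '\\' :: pvPass 'l' '\uE047' [] from pvPass_peel1 _ _ _ (by simp),
      show pvPass 'l' '\uE047' [] = [] from replace_nil _ _ (by simp)]
  rw [show pvPass 'a' '\uE020' ['\\'] = '\\' :: pvPass 'a' '\uE020' [] from pvPass_peel1 _ _ _ (by simp),
      show pvPass 'a' '\uE020' [] = [] from replace_nil _ _ (by simp)]
  rw [show pvPass 'b' '\uE00C' ['\\'] = '\\' :: pvPass 'b' '\uE00C' [] from pvPass_peel1 _ _ _ (by simp),
      show pvPass 'b' '\uE00C' [] = [] from replace_nil _ _ (by simp)]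

set_option maxHeartbeats 2000000 in
theorem pvA_eq_scan : ∀ (n : Nat) (l : List Char), l.length ≤ n → pvA l = pvScan l := by
  intro n
  induction n with
  | zero =>
    intro l h
    cases l with
    | nil => rw [pvA_nil]; rfl
    | cons c t => simp at h
  | succ n ih =>
    intro l hl
    cases l with
    | nil => rw [pvA_nil]; rfl
    | cons c rest =>
      by_cases hc : c = '\\'
      · subst hc
        cases rest with
        | nil => rw [pvA_bsl]; rfl
        | cons d r =>
          by_cases hbs : d = 'b' ∧ r.head? = some 's'
          · obtain ⟨hd, hr⟩ := hbs
            subst hd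
            obtain ⟨r', hr'⟩ : ∃ r', r = 's' :: r' := by
              cases r with
              | nil => simp at hr
              | cons a t => simp at hr; exact ⟨t, by rw [hr]⟩
            subst hr'
            rw [pvA_bs, pvScan_bs, ih r' (by simp at hl; omega)]
          · cases hcode : pvCode1 d with
            | none =>
              rw [pvA_peel d r hcode, pvScan_none d r hcode, ih (d :: r) (by simp at hl ⊢; omega)]
            | some v =>
              have hlen : r.length ≤ n := by simp at hl; omega
              rw [pvScan_code d v r hcode hbs]

              by_cases hd1 : d = 'd'
              · subst hd1
                rw [show pvCode1 'd' = some '\uE048' from rfl] at hcode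
                cases hcode
                rw [pvA_d r, ih r hlen]
              by_cases hd2 : d = 'c'
              · subst hd2
                rw [show pvCode1 'c' = some '\uE043' from rfl] at hcode
                cases hcode
                rw [pvA_c r, ih r hlen]
              by_cases hd3 : d = 'h'
              · subst hd3
                rw [show pvCode1 'h' = some '\uE049' from rfl] at hcode
                cases hcode
                rw [pvA_h r, ih r hlen]
              by_cases hd4 : d = 's'
              · subst hd4
                rw [show pvCode1 's' = some '\uE046' from rfl] at hcode
                cases hcode
                rw [pvA_s r, ih r hlen]
              by_cases hd5 : d = 'n'
              · subst hd5
                rw [show pvCode1 'n' = some '\uE04B' from rfl] at hcode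
                cases hcode
                rw [pvA_n r, ih r hlen]
              by_cases hd6 : d = 'f'
              · subst hd6
                rw [show pvCode1 'f' = some '\uE04F' from rfl] at hcode
                cases hcode
                rw [pvA_f r, ih r hlen]
              by_cases hd7 : d = 'g'
              · subst hd7
                rw [show pvCode1 'g' = some '\uE027' from rfl] at hcode
                cases hcode
                rw [pvA_g r, ih r hlen]
              by_cases hd8 : d = 'i'
              · subst hd8
                rw [show pvCode1 'i' = some '\uE03A' from rfl] at hcode
                cases hcode
                rw [pvA_i r, ih r hlen]
              by_cases hd9 : d = 'm'
              · subst hd9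
                rw [show pvCode1 'm' = some '\uE04D' from rfl] at hcode
                cases hcode
                rw [pvA_m r, ih r hlen]
              by_cases hd10 : d = 't'
              · subst hd10
                rw [show pvCode1 't' = some '\uE01F' from rfl] at hcode
                cases hcode
                rw [pvA_t r, ih r hlen]
              by_cases hd11 : d = 'j'
              · subst hd11
                rw [show pvCode1 'j' = some '\uE010' from rfl] at hcode
                cases hcode
                rw [pvA_j r, ih r hlen]
              by_cases hd12 : d = 'e'
              · subst hd12
                rw [show pvCode1 'e' = some '\uE045' from rfl] at hcode
                cases hcode
                rw [pvA_e r, ih r hlen]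
              by_cases hd13 : d = 'l'
              · subst hd13
                rw [show pvCode1 'l' = some '\uE047' from rfl] at hcode
                cases hcode
                rw [pvA_l r, ih r hlen]
              by_cases hd14 : d = 'a'
              · subst hd14
                rw [show pvCode1 'a' = some '\uE020' from rfl] at hcode
                cases hcode
                rw [pvA_a r, ih r hlen]
              by_cases hd15 : d = 'b'
              · subst hd15
                rw [show pvCode1 'b' = some '\uE00C' from rfl] at hcode
                cases hcode
                rw [pvA_b r (fun hh => hbs ⟨rfl, hh⟩), ih r hlen]
              unfold pvCode1 at hcode
              rw [if_neg hd1, if_neg hd2, if_neg hd3, if_neg hd4, if_neg hd5, if_neg hd6, if_neg hd7, if_neg hd8, if_neg hd9, if_neg hd10, if_neg hd11, if_neg hd12, if_neg hd13, if_neg hd14, if_neg hd15] at hcode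
              cases hcode

      · rw [pvA_cons c rest hc, pvScan_cons_ne c rest hc, ih rest (by simp at hl; omega)]

theorem portA_toList (tag : String) : (replace_codes_py tag).toList = pvA tag.toList := by
  simp only [replace_codes_py, List.foldl, PySem.Str.toList_replace, pvA, pvPass, pvPassBS]
  rfl

theorem portB_toList (tag : String) : (replace_codes_py_alt tag).toList = pvScan tag.toList := by
  simp only [replace_codes_py_alt, String.toList_ofList]

-- ===== VERDICT (by name: the statement is the Claim_ definition above) =====
theorem replace_codes_py_spec : Claim_equal_replace_codes_py := by
  intro tag _
  unfold Spec_replace_codes_py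
  apply String.toList_inj.mp
  rw [portA_toList, portB_toList, pvA_eq_scan tag.toList.length tag.toList (le_refl _)]
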